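-- pv_equiv track=rewrite | github.com/msarrias/applied-bioinformatics-KTH-DD2404 | 01-basic-python/02-reformatting-sequences/Re-formatting_Sequences.py | re_formatting
-- ===== SOURCE A (Python) =====
-- def slicer(list_of_strings, slice_length):
--     """
--     slicer breaks down rows.
--     :param list_of_strings: list.
--     :param slice_length: maximum characters wide per line.
--     """
--     return [list_of_strings[i:i + slice_length] for i in range(0, len(list_of_strings), slice_length)]
--
-- def flatten(list_of_sublists):
--     """
--     flatten: flattens a list of lists into a list.
--     :param list_of_lists: list with sublists.
--     """
--     return [item
--         for sublist in list_of_sublists for item in sublist]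
--
-- def re_formatting (file_python_object , filename):
--     """
--     re_formatting: Reformats the sequences from Stockholm files into Fasta format, depending on the extension .
--     :param file_python_object: object, result after applying the reading_sequences function.
--     :param filename:name of the file on the wd.
--     """
--
--     #if the extension of the file is .sthlm, return the reformated file.
--     if '.sthlm' in filename:
--         # Adds the definition line, followed by an unique identifier.
--         pre_pfam_indicator_sth = list(map((lambda x: '>' + x), file_python_object))
--         # Removes the tab indicator.
--         pre_pfam_tab_split_sth = flatten(list(map(lambda x: x.split('\t'), pre_pfam_indicator_sth )))
--         # Splits each element of the list after the first word of each element, creating more elements.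
--         pre_pfam_split_seq_sth = flatten(list(map(lambda x: x.split(' ', 1), pre_pfam_tab_split_sth)))
--         # Filter for non-empty spaces.
--         pre_pfam_filter_space_sth = list(filter(None, pre_pfam_split_seq_sth))
--         # Apply the slice function to break the lines longer than 60 characters.
--         pre_pfam_flattened_slice_sth = [flattened_row for row_string in pre_pfam_filter_space_sth
--                                         for flattened_row in slicer(row_string, 60)]
--
--         # Add the line breaks for printing and convert into a list.
--         pfam_re_formatted_sth_file = list(map((lambda x: x + '\n'), pre_pfam_flattened_slice_sth))
--
--         return pfam_re_formatted_sth_file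
--
--     #if the extension of the file is .txt, return the reformated file.
--     if '.txt' in filename:
--         # join first to elements of the list.
--         pre_pfam_joint_txt = [" ".join(file_python_object[:2])]+file_python_object[2:]
--         # Add indicator and convert into a list.
--         pre_pfam_indicator_txt = list(map((lambda x: '>' + x), pre_pfam_joint_txt)  )
--         # Splits each element of the list after the first word of each element, creating more elements.
--         pre_pfam_split_seq_txt = flatten(list(map(lambda x: x.split(' ', 1), pre_pfam_indicator_txt)))
--         # Removes blank spaces from each element of the list.
--         pre_pfam_strip_seq_txt = list(map(lambda x: x.strip(), pre_pfam_split_seq_txt))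
--         # Filter for non-empty spaces.
--         pre_pfam_filter_space_txt = list(filter(None, pre_pfam_strip_seq_txt))
--         # Apply the slice function to break the lines longer than 60 characters.
--         pre_pfam_flattened_slice_txt = [flattened_row for row_string in pre_pfam_filter_space_txt
--                                         for flattened_row in slicer(row_string, 60)]
--
--         # Add the line breaks for printing and convert into a list.
--         pfam_re_formatted_txt_file = list(map((lambda x: x + '\n'), pre_pfam_flattened_slice_txt))
--         return pfam_re_formatted_txt_file
-- ===== SOURCE B (Python) =====
-- def re_formatting(file_python_object, filename):
--     """Single fused loop emitting 60-char FASTA lines directly (no map/flatten/filter pipelines)."""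
--     if '.sthlm' in filename:
--         out = []
--         for x in file_python_object:
--             for part in ('>' + x).split('\t'):
--                 for piece in part.split(' ', 1):
--                     while piece:
--                         out.append(piece[:60] + '\n')
--                         piece = piece[60:]
--         return out
--     if '.txt' in filename:
--         out = []
--         for x in [' '.join(file_python_object[:2])] + file_python_object[2:]:
--             for raw in ('>' + x).split(' ', 1):
--                 piece = raw.strip()
--                 while piece:
--                     out.append(piece[:60] + '\n')
--                     piece = piece[60:]
--         return out
-- ===== Notes on version B (the rewrite author's own statement) =====
-- stated objective: simpler
-- what changed: Replaces A's six-stage map/flatten/filter/slice/map pipelines (with a range-indexed slicer helper) by one fused nested loop per branch that splits each line and emits the 60-char newline-terminated chunks directly by repeated take/drop, with no intermediate lists, no flatten helper and no filter pass.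
import Mathlib
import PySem

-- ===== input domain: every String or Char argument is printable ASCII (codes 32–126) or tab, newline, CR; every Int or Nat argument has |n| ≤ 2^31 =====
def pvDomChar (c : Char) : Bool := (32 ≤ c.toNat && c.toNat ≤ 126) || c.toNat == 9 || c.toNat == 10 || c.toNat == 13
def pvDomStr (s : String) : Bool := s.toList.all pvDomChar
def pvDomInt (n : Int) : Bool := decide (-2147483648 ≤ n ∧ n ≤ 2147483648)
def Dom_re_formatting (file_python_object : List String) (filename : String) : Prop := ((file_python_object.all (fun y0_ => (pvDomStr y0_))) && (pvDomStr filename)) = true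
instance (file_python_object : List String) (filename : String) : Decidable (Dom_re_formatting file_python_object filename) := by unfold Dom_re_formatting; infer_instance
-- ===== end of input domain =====

-- B replaces A's six-stage map/flatten/filter/slice pipelines by one fused loop that
-- emits the 60-char '\n'-terminated lines directly (objective: simpler). Return value only; no mutation.

-- ===== PORT A =====
-- slicer(list_of_strings, slice_length), used by A on strings
def slicerA (s : String) (slice_length : Int) : List String :=
  (PySem.List.pyRange 0 (PySem.Str.len s) slice_length).map
    (fun i => PySem.Str.slice s (some i) (some (i + slice_length)))

-- flatten(list_of_sublists)
def flattenA (l : List (List String)) : List String := l.flatMap (fun sublist => sublist)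

def re_formatting (file_python_object : List String) (filename : String) : Option (List String) :=
  if PySem.Str.isIn ".sthlm" filename then
    let pre_pfam_indicator_sth := file_python_object.map (fun x => ">" ++ x)
    -- x.split('\t'): sep ≠ "" so split? is always some; .getD [] is unreachable
    let pre_pfam_tab_split_sth := flattenA (pre_pfam_indicator_sth.map (fun x => (PySem.Str.split? x "\t").getD []))
    let pre_pfam_split_seq_sth := flattenA (pre_pfam_tab_split_sth.map (fun x => (PySem.Str.splitMax? x " " 1).getD []))
    -- filter(None, strings) keeps the non-empty strings
    let pre_pfam_filter_space_sth := pre_pfam_split_seq_sth.filter (fun x => x != "")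
    let pre_pfam_flattened_slice_sth := pre_pfam_filter_space_sth.flatMap (fun row_string => slicerA row_string 60)
    some (pre_pfam_flattened_slice_sth.map (fun x => x ++ "\n"))
  else if PySem.Str.isIn ".txt" filename then
    let pre_pfam_joint_txt := [PySem.Str.join " " (PySem.List.slice file_python_object none (some 2))] ++ PySem.List.slice file_python_object (some 2) none
    let pre_pfam_indicator_txt := pre_pfam_joint_txt.map (fun x => ">" ++ x)
    let pre_pfam_split_seq_txt := flattenA (pre_pfam_indicator_txt.map (fun x => (PySem.Str.splitMax? x " " 1).getD []))
    let pre_pfam_strip_seq_txt := pre_pfam_split_seq_txt.map PySem.Str.strip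
    let pre_pfam_filter_space_txt := pre_pfam_strip_seq_txt.filter (fun x => x != "")
    let pre_pfam_flattened_slice_txt := pre_pfam_filter_space_txt.flatMap (fun row_string => slicerA row_string 60)
    some (pre_pfam_flattened_slice_txt.map (fun x => x ++ "\n"))
  else none

-- ===== PORT B =====
-- the 'while piece: out.append(piece[:60] + '\n'); piece = piece[60:]' loop of Source B,
-- on the code points (piece[:60]/piece[60:] are take/drop by PySem.Str.toList_slice; exact)
def chunksB (cs : List Char) : List String :=
  if h : cs = [] then []
  else (String.ofList (cs.take 60) ++ "\n") :: chunksB (cs.drop 60)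
termination_by cs.length
decreasing_by
  have := List.length_pos_of_ne_nil h
  simp only [List.length_drop]; omega

def re_formatting_alt (file_python_object : List String) (filename : String) : Option (List String) :=
  if PySem.Str.isIn ".sthlm" filename then
    some (file_python_object.foldl (fun out x =>
      (((PySem.Str.split? (">" ++ x) "\t").getD []).foldl (fun out part =>
        (((PySem.Str.splitMax? part " " 1).getD []).foldl (fun out piece =>
          out ++ chunksB piece.toList) out)) out)) [])
  else if PySem.Str.isIn ".txt" filename then
    some (([PySem.Str.join " " (PySem.List.slice file_python_object none (some 2))] ++ PySem.List.slice file_python_object (some 2) none).foldl (fun out x =>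
      (((PySem.Str.splitMax? (">" ++ x) " " 1).getD []).foldl (fun out raw =>
        out ++ chunksB (PySem.Str.strip raw).toList) out)) [])
  else none

-- ===== PRECONDITION & SPEC =====
def Spec_re_formatting (file_python_object : List String) (filename : String) (out : Option (List String)) : Prop := out = re_formatting_alt file_python_object filename
instance (file_python_object : List String) (filename : String) (out : Option (List String)) : Decidable (Spec_re_formatting file_python_object filename out) := by unfold Spec_re_formatting; infer_instance

-- ===== CLAIM (what is proved, stated in full; the proofs are below) =====
def Claim_equal_re_formatting : Prop := ∀ (file_python_object : List String) (filename : String), Dom_re_formatting file_python_object filename → Spec_re_formatting file_python_object filename (re_formatting file_python_object filename)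

-- ===== LEMMAS AND PROOFS =====

theorem chunksB_nil : chunksB [] = [] := by rw [chunksB]; simp

theorem chunksB_cons (cs : List Char) (h : cs ≠ []) :
    chunksB cs = (String.ofList (cs.take 60) ++ "\n") :: chunksB (cs.drop 60) := by
  rw [chunksB]; simp [h]

-- List.range count of 60-char slices = the take/drop chunking
theorem range_slices_eq_chunksB (c : Nat) :
    ∀ cs : List Char, (cs.length + 59) / 60 = c →
      (List.range c).map (fun k => String.ofList ((cs.drop (60 * k)).take 60) ++ "\n") = chunksB cs := by
  induction c with
  | zero =>
      intro cs hc
      have : cs = [] := by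
        have := List.eq_nil_iff_length_eq_zero (l := cs)
        apply this.mpr; omega
      simp [this, chunksB_nil]
  | succ c ih =>
      intro cs hc
      have hne : cs ≠ [] := by
        intro h; subst h; simp only [List.length_nil] at hc; omega
      have hlen := List.length_pos_of_ne_nil hne
      rw [chunksB_cons cs hne, List.range_succ_eq_map]
      simp only [List.map_cons, List.map_map]
      refine congrArg₂ List.cons (by norm_num) ?_
      · have hlen' : ((cs.drop 60).length + 59) / 60 = c := by
          have hd : (cs.drop 60).length = cs.length - 60 := by simp
          omega
        rw [← ih (cs.drop 60) hlen']
        apply List.map_congr_left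
        intro k _
        simp only [Function.comp_apply, List.drop_drop, Nat.succ_eq_add_one]
        have h60 : 60 * (k + 1) = 60 + 60 * k := by ring
        rw [h60]

-- per-piece: A's slicer-then-'\n' equals B's chunking loop
theorem slicerA_map_eq_chunksB (s : String) :
    (slicerA s 60).map (fun x => x ++ "\n") = chunksB s.toList := by
  unfold slicerA
  simp only [PySem.Str.len, PySem.List.pyRange]
  norm_num
  simp only [← String.length_toList]
  rw [show (if 0 < s.toList.length then (((s.toList.length : Int) + 60 - 1) / 60).toNat else 0)
        = (s.toList.length + 59) / 60 by split <;> omega]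
  rw [← range_slices_eq_chunksB ((s.toList.length + 59) / 60) s.toList rfl]
  apply List.map_congr_left
  intro k _
  simp only [Function.comp_apply]
  congr 1
  simp only [PySem.Str.slice]
  congr 1
  simp only [PySem.Chars.slice_eq_listSlice]
  rw [show (60 * (k : Int)) = ((60 * k : Nat) : Int) by push_cast; ring,
      show ((60 * k : Nat) : Int) + 60 = (((60 * k + 60) : Nat) : Int) by push_cast; ring]
  rw [PySem.List.slice_natCast]
  congr 1
  omega

theorem chunksB_empty_str : chunksB ("" : String).toList = [] := by
  simp [chunksB_nil]

-- dropping a filter that only removes elements the continuation sends to []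
theorem flatMap_filter_ne (l : List String) (h : String → List String) (h0 : h "" = []) :
    (l.filter (fun x => x != "")).flatMap h = l.flatMap h := by
  induction l with
  | nil => rfl
  | cons a t ih =>
      by_cases ha : a = ""
      · subst ha; simp [h0, ih]
      · simp [ha, ih]

theorem h_empty : (fun r => (slicerA r 60).map (fun x => x ++ "\n")) "" = [] := by
  simp only [slicerA_map_eq_chunksB, chunksB_empty_str]

-- ===== VERDICT (by name: the statement is the Claim_ definition above) =====
theorem re_formatting_spec : Claim_equal_re_formatting := by
  intro fpo fn _
  unfold Spec_re_formatting re_formatting re_formatting_alt flattenA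
  by_cases h1 : PySem.Str.isIn ".sthlm" fn
  · simp only [h1, if_true]
    congr 1
    simp only [PySem.List.foldl_append_eq_flatMap, List.nil_append,
      List.map_flatMap, List.flatMap_assoc, List.flatMap_map]
    rw [flatMap_filter_ne _ _ h_empty]
    simp only [List.flatMap_assoc, slicerA_map_eq_chunksB]
  · by_cases h2 : PySem.Str.isIn ".txt" fn
    · rw [if_neg h1, if_neg h1, if_pos h2, if_pos h2]
      refine congrArg some ?_
      simp only [PySem.List.foldl_append_eq_flatMap, List.nil_append,
        List.map_flatMap, List.flatMap_map]
      rw [flatMap_filter_ne _ _ h_empty]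
      simp only [List.flatMap_map, List.flatMap_assoc, slicerA_map_eq_chunksB]
    · rw [if_neg h1, if_neg h1, if_neg h2, if_neg h2]
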